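-- pv_equiv track=rewrite | github.com/Orion907/research_data_extractor | src/utils/domain_priming/term_mapper.py | _identify_domain_indicators
-- ===== SOURCE A (Python) =====
-- from typing import Dict, List, Set, Optional, Tuple
--
-- def _identify_domain_indicators(term_frequencies: Dict[str, int]) -> List[str]:
--     """
--     Identify terms that suggest specific medical/research domains
--
--     Args:
--         term_frequencies (Dict): Term frequency data
--
--     Returns:
--         List[str]: Domain indicator terms
--     """
--     # Domain-specific term patterns
--     domain_patterns = {
--         'cardiology': ['cardiovascular', 'cardiac', 'heart', 'blood', 'pressure', 'artery'],
--         'diabetes': ['diabetes', 'glucose', 'insulin', 'glycemic', 'hemoglobin', 'hba1c'],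
--         'oncology': ['cancer', 'tumor', 'chemotherapy', 'radiation', 'oncology', 'malignant'],
--         'neurology': ['neurological', 'brain', 'cognitive', 'memory', 'alzheimer', 'parkinson'],
--         'psychology': ['psychological', 'mental', 'depression', 'anxiety', 'therapy', 'behavioral'],
--         'surgery': ['surgical', 'operation', 'procedure', 'operative', 'incision', 'anesthesia']
--     }
--
--     domain_indicators = []
--
--     for domain, keywords in domain_patterns.items():
--         domain_score = sum(term_frequencies.get(keyword, 0) for keyword in keywords)
--         if domain_score >= 3:  # Threshold for domain relevance
--             domain_indicators.append(f"{domain}:{domain_score}")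
--
--     return domain_indicators
-- ===== SOURCE B (Python) =====
-- from typing import Dict, List
--
--
-- def _identify_domain_indicators(term_frequencies: Dict[str, int]) -> List[str]:
--     """Single pass over the input terms using an inverted keyword->domain index."""
--     domain_patterns = {
--         'cardiology': ['cardiovascular', 'cardiac', 'heart', 'blood', 'pressure', 'artery'],
--         'diabetes': ['diabetes', 'glucose', 'insulin', 'glycemic', 'hemoglobin', 'hba1c'],
--         'oncology': ['cancer', 'tumor', 'chemotherapy', 'radiation', 'oncology', 'malignant'],
--         'neurology': ['neurological', 'brain', 'cognitive', 'memory', 'alzheimer', 'parkinson'],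
--         'psychology': ['psychological', 'mental', 'depression', 'anxiety', 'therapy', 'behavioral'],
--         'surgery': ['surgical', 'operation', 'procedure', 'operative', 'incision', 'anesthesia']
--     }
--
--     keyword_domain = {kw: domain for domain, kws in domain_patterns.items() for kw in kws}
--     scores = {domain: 0 for domain in domain_patterns}
--
--     for term, freq in term_frequencies.items():
--         domain = keyword_domain.get(term)
--         if domain is not None:
--             scores[domain] = scores[domain] + freq
--
--     return [f"{domain}:{score}" for domain, score in scores.items() if score >= 3]
-- ===== Notes on version B (the rewrite author's own statement) =====
-- stated objective: alternative
-- what changed: Replaces the per-domain sum over each keyword list (36 dict lookups) by an inverted keyword->domain index and a single pass over the input term items that accumulates per-domain scores, then emits 'domain:score' in the fixed domain order. Pre_ excludes association lists with duplicate keys, which do not represent any Python dict.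
import Mathlib
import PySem

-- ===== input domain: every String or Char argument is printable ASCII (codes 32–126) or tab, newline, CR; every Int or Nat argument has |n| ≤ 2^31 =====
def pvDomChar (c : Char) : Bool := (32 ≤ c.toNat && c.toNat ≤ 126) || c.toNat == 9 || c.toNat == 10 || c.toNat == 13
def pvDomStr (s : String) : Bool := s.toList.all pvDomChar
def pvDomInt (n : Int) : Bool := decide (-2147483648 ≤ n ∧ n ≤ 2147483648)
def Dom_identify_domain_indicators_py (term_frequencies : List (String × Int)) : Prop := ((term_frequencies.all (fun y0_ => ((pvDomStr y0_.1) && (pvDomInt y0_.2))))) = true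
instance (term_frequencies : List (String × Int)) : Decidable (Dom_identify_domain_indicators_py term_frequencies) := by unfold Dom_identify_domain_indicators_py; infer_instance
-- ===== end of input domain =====

-- B replaces A's per-domain keyword-sum loops by an inverted keyword->domain index and one
-- accumulating pass over the input term items (alternative decomposition, same results).


-- the fixed domain_patterns table shared by both Pythons (a literal in each)
def pvPatterns : List (String × List String) := [
  ("cardiology", ["cardiovascular", "cardiac", "heart", "blood", "pressure", "artery"]),
  ("diabetes", ["diabetes", "glucose", "insulin", "glycemic", "hemoglobin", "hba1c"]),
  ("oncology", ["cancer", "tumor", "chemotherapy", "radiation", "oncology", "malignant"]),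
  ("neurology", ["neurological", "brain", "cognitive", "memory", "alzheimer", "parkinson"]),
  ("psychology", ["psychological", "mental", "depression", "anxiety", "therapy", "behavioral"]),
  ("surgery", ["surgical", "operation", "procedure", "operative", "incision", "anesthesia"])]

-- ===== PORT A =====
-- for each domain: sum term_frequencies.get(keyword, 0) over its keywords, append "domain:score" when score >= 3
def identify_domain_indicators_py (term_frequencies : List (String × Int)) : List String :=
  pvPatterns.foldl (fun acc p =>
    let score := p.2.foldl (fun s k => s + (PySem.Dict.mk term_frequencies).getD k 0) 0
    if 3 ≤ score then acc ++ [p.1 ++ ":" ++ PySem.Int.toStr score] else acc) []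

-- ===== PORT B =====
-- keyword_domain = {kw: domain for domain, kws in domain_patterns.items() for kw in kws}
def pvIndexB : PySem.Dict String String :=
  pvPatterns.foldl (fun d p => p.2.foldl (fun d k => d.insert k p.1) d) PySem.Dict.empty

-- scores = {domain: 0 for domain in domain_patterns}
def pvScores0 : PySem.Dict String Int :=
  pvPatterns.foldl (fun d p => d.insert p.1 0) PySem.Dict.empty

def identify_domain_indicators_py_alt (term_frequencies : List (String × Int)) : List String :=
  let scores := term_frequencies.foldl (fun sc q =>
      match pvIndexB.get? q.1 with
      | some d => sc.insert d (sc.getD d 0 + q.2)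
      | none => sc) pvScores0
  scores.items.foldl (fun acc q =>
    if 3 ≤ q.2 then acc ++ [q.1 ++ ":" ++ PySem.Int.toStr q.2] else acc) []

-- ===== PRECONDITION & SPEC =====
-- Pre_ excludes association lists with duplicate keys: they do not correspond to any Python dict
-- (dict keys are unique), and there A's first-match lookups and B's pass over all items disagree.
def Pre_identify_domain_indicators_py (term_frequencies : List (String × Int)) : Prop :=
  (term_frequencies.map Prod.fst).Nodup
instance (term_frequencies : List (String × Int)) : Decidable (Pre_identify_domain_indicators_py term_frequencies) := by unfold Pre_identify_domain_indicators_py; infer_instance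

def pvWitness_identify_domain_indicators_py : (List (String × Int)) :=
  [("heart", 2), ("blood", 1), ("cancer", 3), ("foo", 9)]

def Spec_identify_domain_indicators_py (term_frequencies : List (String × Int)) (out : List String) : Prop := out = identify_domain_indicators_py_alt term_frequencies
instance (term_frequencies : List (String × Int)) (out : List String) : Decidable (Spec_identify_domain_indicators_py term_frequencies out) := by unfold Spec_identify_domain_indicators_py; infer_instance

-- ===== CLAIM (what is proved, stated in full; the proofs are below) =====
def Claim_equal_identify_domain_indicators_py : Prop := ∀ (term_frequencies : List (String × Int)), Dom_identify_domain_indicators_py term_frequencies → Pre_identify_domain_indicators_py term_frequencies → Spec_identify_domain_indicators_py term_frequencies (identify_domain_indicators_py term_frequencies)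

-- ===== LEMMAS AND PROOFS =====

-- first-match lookup in the input association list (A's term_frequencies.get(k, 0))
def pvGetD (tf : List (String × Int)) (k : String) : Int := (PySem.Dict.mk tf).getD k 0

-- total frequency that B's pass attributes to domain d
def pvS (tf : List (String × Int)) (d : String) : Int :=
  ((tf.filter (fun q => pvIndexB.get? q.1 == some d)).map (·.2)).sum

lemma pvGetD_cons (t : String) (f : Int) (rest : List (String × Int)) (k : String) :
    pvGetD ((t, f) :: rest) k = if t == k then f else pvGetD rest k := by
  simp [pvGetD, PySem.Dict.getD_eq_get?_getD, PySem.Dict.get?_mk_cons]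
  split <;> rfl

lemma pvGetD_of_not_mem (rest : List (String × Int)) (t : String)
    (h : t ∉ rest.map Prod.fst) : pvGetD rest t = 0 := by
  apply PySem.Dict.getD_of_not_contains
  simp [PySem.Dict.contains_mk, List.any_eq_false]
  intro a b hab hba
  exact h (by simpa [hba] using List.mem_map_of_mem (f := Prod.fst) hab)

lemma sum_ite_eq_of_nodup (kws : List String) (hk : kws.Nodup) (t : String) (f : Int) :
    ((kws.map (fun k => if k = t then f else 0)).sum) = if t ∈ kws then f else 0 := by
  induction kws with
  | nil => simp
  | cons a l ih =>
    simp only [List.nodup_cons] at hk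
    rcases hk with ⟨ha, hl⟩
    by_cases hat : a = t
    · subst hat
      have : ((l.map (fun k => if k = a then f else 0)).sum) = 0 := by
        rw [ih hl]; simp [ha]
      simp [this]
    · simp [hat, ih hl, List.mem_cons, Ne.symm hat]

-- A's per-domain sum equals B's accumulated contribution, for any keyword list that
-- characterises exactly the terms the index maps to d (keys of tf distinct).
lemma sumA_eq_pvS (d : String) (kws : List String) (hk : kws.Nodup)
    (hiff : ∀ t, pvIndexB.get? t = some d ↔ t ∈ kws) :
    ∀ (tf : List (String × Int)), (tf.map Prod.fst).Nodup →
      ((kws.map (pvGetD tf)).sum) = pvS tf d := by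
  intro tf
  induction tf with
  | nil =>
    intro _
    simp [pvS, show pvGetD [] = fun _ => 0 from rfl]
  | cons p rest ih =>
    intro hnd
    obtain ⟨t, f⟩ := p
    simp only [List.map_cons, List.nodup_cons] at hnd
    rcases hnd with ⟨ht, hrest⟩
    have step : ∀ k, pvGetD ((t, f) :: rest) k = pvGetD rest k + (if k = t then f else 0) := by
      intro k
      rw [pvGetD_cons]
      by_cases hkt : t = k
      · subst hkt
        simp [pvGetD_of_not_mem rest t ht]
      · simp [hkt, Ne.symm hkt]
    calc ((kws.map (pvGetD ((t, f) :: rest))).sum)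
        = ((kws.map (fun k => pvGetD rest k + (if k = t then f else 0))).sum) := by
          congr 1; exact List.map_congr_left (fun k _ => step k)
      _ = ((kws.map (pvGetD rest)).sum) + ((kws.map (fun k => if k = t then f else 0)).sum) := by
          simp [List.sum_map_add]
      _ = pvS rest d + (if t ∈ kws then f else 0) := by
          rw [ih hrest, sum_ite_eq_of_nodup kws hk]
      _ = pvS ((t, f) :: rest) d := by
          simp only [pvS, List.filter_cons]
          by_cases hd : pvIndexB.get? t = some d
          · simp [hd, (hiff t).mp hd, add_comm]
          · have : t ∉ kws := fun hm => hd ((hiff t).mpr hm)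
            simp only [beq_iff_eq]
            simp [hd, this]

-- B's accumulation loop: final score of d = initial score + pvS
lemma loop_getD (tf : List (String × Int)) :
    ∀ (sc : PySem.Dict String Int) (d : String),
      (tf.foldl (fun sc q =>
        match pvIndexB.get? q.1 with
        | some d => sc.insert d (sc.getD d 0 + q.2)
        | none => sc) sc).getD d 0 = sc.getD d 0 + pvS tf d := by
  induction tf with
  | nil => intro sc d; simp [pvS]
  | cons q rest ih =>
    intro sc d
    simp only [List.foldl_cons]
    cases hq : pvIndexB.get? q.1 with
    | none =>
      rw [ih]
      simp [pvS, hq]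
    | some d' =>
      rw [ih]
      rw [PySem.Dict.getD_insert]
      simp only [pvS, List.filter_cons, hq]
      by_cases hdd : d = d'
      · subst hdd; simp; ring
      · have : ¬ ((some d' == some d) = true) := by simp [Ne.symm hdd]
        simp [hdd, this]

set_option maxRecDepth 200000 in
lemma pvIndexB_items : pvIndexB.items = [("cardiovascular", "cardiology"), ("cardiac", "cardiology"), ("heart", "cardiology"), ("blood", "cardiology"), ("pressure", "cardiology"), ("artery", "cardiology"),
    ("diabetes", "diabetes"), ("glucose", "diabetes"), ("insulin", "diabetes"), ("glycemic", "diabetes"), ("hemoglobin", "diabetes"), ("hba1c", "diabetes"),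
    ("cancer", "oncology"), ("tumor", "oncology"), ("chemotherapy", "oncology"), ("radiation", "oncology"), ("oncology", "oncology"), ("malignant", "oncology"),
    ("neurological", "neurology"), ("brain", "neurology"), ("cognitive", "neurology"), ("memory", "neurology"), ("alzheimer", "neurology"), ("parkinson", "neurology"),
    ("psychological", "psychology"), ("mental", "psychology"), ("depression", "psychology"), ("anxiety", "psychology"), ("therapy", "psychology"), ("behavioral", "psychology"),
    ("surgical", "surgery"), ("operation", "surgery"), ("procedure", "surgery"), ("operative", "surgery"), ("incision", "surgery"), ("anesthesia", "surgery")] := by rfl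

-- the loop never adds a key: every index value is one of the six domains already in scores
lemma index_value_mem (t d : String) (h : pvIndexB.get? t = some d) :
    d ∈ ["cardiology", "diabetes", "oncology", "neurology", "psychology", "surgery"] := by
  have hm := PySem.Dict.mem_items_of_get?_eq_some pvIndexB h
  rw [pvIndexB_items] at hm
  simp only [List.mem_cons, List.not_mem_nil, or_false, Prod.mk.injEq] at hm
  rcases hm with ⟨-, rfl⟩|⟨-, rfl⟩|⟨-, rfl⟩|⟨-, rfl⟩|⟨-, rfl⟩|⟨-, rfl⟩|⟨-, rfl⟩|⟨-, rfl⟩|⟨-, rfl⟩|⟨-, rfl⟩|⟨-, rfl⟩|⟨-, rfl⟩|⟨-, rfl⟩|⟨-, rfl⟩|⟨-, rfl⟩|⟨-, rfl⟩|⟨-, rfl⟩|⟨-, rfl⟩|⟨-, rfl⟩|⟨-, rfl⟩|⟨-, rfl⟩|⟨-, rfl⟩|⟨-, rfl⟩|⟨-, rfl⟩|⟨-, rfl⟩|⟨-, rfl⟩|⟨-, rfl⟩|⟨-, rfl⟩|⟨-, rfl⟩|⟨-, rfl⟩|⟨-, rfl⟩|⟨-, rfl⟩|⟨-, rfl⟩|⟨-,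 rfl⟩|⟨-, rfl⟩|⟨-, rfl⟩ <;> decide

lemma keys_nodup_pvIndexB : pvIndexB.keys.Nodup := by
  rw [show pvIndexB.keys = pvIndexB.items.map Prod.fst from rfl, pvIndexB_items]
  decide

-- characterising the index per domain: get? t = some d ↔ t is one of d's keywords
lemma hiff_domain (p : String × List String) (hp : p ∈ pvPatterns) :
    ∀ t, pvIndexB.get? t = some p.1 ↔ t ∈ p.2 := by
  intro t
  rw [PySem.Dict.get?_eq_some_iff_mem_items pvIndexB t p.1 keys_nodup_pvIndexB]
  rw [pvIndexB_items]
  fin_cases hp <;>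
    simp

-- the keys of the scores dict are invariant under the loop
lemma keys_loop (tf : List (String × Int)) :
    ∀ (sc : PySem.Dict String Int),
      sc.keys = ["cardiology", "diabetes", "oncology", "neurology", "psychology", "surgery"] →
      (tf.foldl (fun sc q =>
        match pvIndexB.get? q.1 with
        | some d => sc.insert d (sc.getD d 0 + q.2)
        | none => sc) sc).keys = ["cardiology", "diabetes", "oncology", "neurology", "psychology", "surgery"] := by
  induction tf with
  | nil => intro sc h; simpa using h
  | cons q rest ih =>
    intro sc h
    simp only [List.foldl_cons]
    cases hq : pvIndexB.get? q.1 with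
    | none => exact ih sc h
    | some d =>
      apply ih
      rw [PySem.Dict.keys_insert_of_contains, h]
      rw [PySem.Dict.contains_iff_mem_keys, h]
      exact (by simpa using index_value_mem q.1 d hq)

-- ===== VERDICT (by name: the statement is the Claim_ definition above) =====
theorem identify_domain_indicators_py_spec : Claim_equal_identify_domain_indicators_py := by
  intro tf _ hpre
  unfold Spec_identify_domain_indicators_py
  set scores := tf.foldl (fun sc q =>
      match pvIndexB.get? q.1 with
      | some d => sc.insert d (sc.getD d 0 + q.2)
      | none => sc) pvScores0 with hscores
  have hB : identify_domain_indicators_py_alt tf =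
      scores.items.foldl (fun acc q =>
        if 3 ≤ q.2 then acc ++ [q.1 ++ ":" ++ PySem.Int.toStr q.2] else acc) [] := rfl
  rw [hB]
  unfold identify_domain_indicators_py
  have hkeys : scores.keys = ["cardiology", "diabetes", "oncology", "neurology", "psychology", "surgery"] := by
    rw [hscores]; exact keys_loop tf pvScores0 (by decide)
  have hknd : scores.keys.Nodup := by rw [hkeys]; decide
  have hitems : scores.items = (pvPatterns.map Prod.fst).map (fun k => (k, scores.getD k 0)) := by
    rw [PySem.Dict.items_eq_map_keys scores hknd 0, hkeys]; rfl
  rw [hitems, List.foldl_map, List.foldl_map]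
  apply PySem.List.foldl_congr_mem
  intro acc p hp
  have hscore : (p.2.foldl (fun s k => s + (PySem.Dict.mk tf).getD k 0) 0) = scores.getD p.1 0 := by
    rw [hscores, loop_getD tf pvScores0 p.1]
    have h0 : pvScores0.getD p.1 0 = 0 := by
      fin_cases hp <;> decide
    rw [h0, zero_add]
    have hknodup : p.2.Nodup := by fin_cases hp <;> decide
    rw [PySem.List.foldl_add]
    simpa using sumA_eq_pvS p.1 p.2 hknodup (hiff_domain p hp) tf hpre
  simp only [hscore]
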